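-- pv_equiv track=rewrite | github.com/tempa37/ui_app | main.py | _trim_sensor_code
-- ===== SOURCE A (Python) =====
-- def _trim_sensor_code(text: str) -> str:
--     token = text.strip()
--     if not token:
--         return ""
--     allowed = set("0123456789abcdefABCDEFxX")
--     result_chars: list[str] = []
--     for ch in token:
--         if ch not in allowed:
--             break
--         result_chars.append(ch)
--         if len(result_chars) >= 4:
--             break
--     return "".join(result_chars)
-- ===== SOURCE B (Python) =====
-- def _trim_sensor_code(text: str) -> str:
--     def take(s: str, k: int) -> str:
--         if k == 0 or not s or s[0] not in "0123456789abcdefABCDEFxX":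
--             return ""
--         return s[0] + take(s[1:], k - 1)
--     return take(text.strip(), 4)
-- ===== Notes on version B (the rewrite author's own statement) =====
-- stated objective: alternative
-- what changed: A scans the stripped token iteratively, growing a result_chars accumulator with two break conditions and a final join behind an empty-string guard; B is a structural recursion with an explicit budget of 4 that builds the result on the return path by prepending the head character, with no accumulator, no join and no empty-string guard.
import Mathlib
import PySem

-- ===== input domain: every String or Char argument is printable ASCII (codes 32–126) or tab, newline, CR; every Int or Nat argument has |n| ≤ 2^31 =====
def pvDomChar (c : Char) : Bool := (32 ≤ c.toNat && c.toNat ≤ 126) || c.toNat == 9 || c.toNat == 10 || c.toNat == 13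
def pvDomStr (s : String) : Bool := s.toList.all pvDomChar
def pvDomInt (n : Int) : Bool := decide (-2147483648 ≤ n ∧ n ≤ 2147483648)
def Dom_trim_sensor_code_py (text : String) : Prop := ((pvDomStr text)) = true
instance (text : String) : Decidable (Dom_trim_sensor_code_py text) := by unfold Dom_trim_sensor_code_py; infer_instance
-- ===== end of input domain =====

-- B replaces A's iterative accumulate-with-two-breaks-and-join scan by a budgeted structural
-- recursion that builds the result on the return path (objective: alternative).

-- ===== PORT A =====
-- allowed = set("0123456789abcdefABCDEFxX")
def pvAllowedA : PySem.Set Char := PySem.Set.ofList "0123456789abcdefABCDEFxX".toList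

-- the for-loop over token with result_chars accumulator and the two breaks
def pvALoop (acc : List Char) : List Char → List Char
  | [] => acc
  | c :: rest =>
    if PySem.Set.contains pvAllowedA c = false then acc
    else
      let acc' := acc ++ [c]
      if 4 ≤ acc'.length then acc' else pvALoop acc' rest

def trim_sensor_code_py (text : String) : String :=
  let token := PySem.Chars.strip text.toList
  if token.isEmpty then String.ofList []
  else String.ofList (pvALoop [] token)

-- ===== PORT B =====
-- def take(s, k): if k == 0 or not s or s[0] not in "0123…xX": return ""; return s[0] + take(s[1:], k-1)
def pvTakeB : List Char → Nat → List Char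
  | _, 0 => []
  | [], _ + 1 => []
  | c :: rest, k + 1 =>
    if !("0123456789abcdefABCDEFxX".toList.contains c) then []
    else c :: pvTakeB rest k

def trim_sensor_code_py_alt (text : String) : String :=
  String.ofList (pvTakeB (PySem.Chars.strip text.toList) 4)

-- ===== PRECONDITION & SPEC =====
def Spec_trim_sensor_code_py (text : String) (out : String) : Prop := out = trim_sensor_code_py_alt text
instance (text : String) (out : String) : Decidable (Spec_trim_sensor_code_py text out) := by unfold Spec_trim_sensor_code_py; infer_instance

-- ===== CLAIM (what is proved, stated in full; the proofs are below) =====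
def Claim_equal_trim_sensor_code_py : Prop := ∀ (text : String), Dom_trim_sensor_code_py text → Spec_trim_sensor_code_py text (trim_sensor_code_py text)

-- ===== LEMMAS AND PROOFS =====

lemma pvAllowed_mem (c : Char) :
    PySem.Set.contains pvAllowedA c = "0123456789abcdefABCDEFxX".toList.contains c := by
  have h : pvAllowedA = "0123456789abcdefABCDEFxX".toList := by decide
  rw [h, PySem.Set.contains]

lemma pvALoop_eq (l : List Char) : ∀ (acc : List Char), acc.length < 4 →
    pvALoop acc l = acc ++ pvTakeB l (4 - acc.length) := by
  induction l with
  | nil =>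
    intro acc h
    have : ∃ k, 4 - acc.length = k + 1 := ⟨4 - acc.length - 1, by omega⟩
    obtain ⟨k, hk⟩ := this
    simp [pvALoop, hk, pvTakeB]
  | cons c rest ih =>
    intro acc hlen
    have hstep : 4 - acc.length = (4 - (acc.length + 1)) + 1 := by omega
    rw [pvALoop, hstep, pvTakeB, pvAllowed_mem]
    cases h : "0123456789abcdefABCDEFxX".toList.contains c
    · simp
    · by_cases h4 : 4 ≤ acc.length + 1
      · have hz : 4 - (acc.length + 1) = 0 := by omega
        simp [h4, hz, pvTakeB]
      · have := ih (acc ++ [c]) (by simp; omega)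
        simp only [List.length_append, List.length_singleton] at this
        simp [h4, this]

-- ===== VERDICT (by name: the statement is the Claim_ definition above) =====

theorem trim_sensor_code_py_spec : Claim_equal_trim_sensor_code_py := by
  intro text _
  unfold Spec_trim_sensor_code_py trim_sensor_code_py trim_sensor_code_py_alt
  by_cases he : (PySem.Chars.strip text.toList).isEmpty
  · rw [List.isEmpty_iff] at he
    simp [he, pvTakeB]
  · rw [if_neg (by simpa using he)]
    rw [pvALoop_eq (PySem.Chars.strip text.toList) [] (by simp)]
    simp
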